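-- pv_equiv track=rewrite | github.com/Ilay-Code/selfPy | Basic Course/Hangman/hangman-unit7/hangman-ex7.2.7.py | arrow
-- ===== SOURCE A (Python) =====
-- def arrow(my_char, max_length):
--     result = []
--     for i in range(1, max_length + 1):
--         result.append(my_char * i)
--         if i == max_length:
--             break
--     for i in range(max_length - 1, 0, -1):
--         result.append(my_char * i)
--     return '\n'.join(result)
-- ===== SOURCE B (Python) =====
-- def arrow(my_char, max_length):
--     return '\n'.join(my_char * (max_length - abs(max_length - i))
--                      for i in range(1, 2 * max_length))
-- ===== Notes on version B (the rewrite author's own statement) =====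
-- stated objective: alternative
-- what changed: B replaces A's two directional loops by a single pass over range(1, 2*max_length) computing each line's width with the closed form max_length - abs(max_length - i), so no mirroring or second loop exists at all.
import Mathlib
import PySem

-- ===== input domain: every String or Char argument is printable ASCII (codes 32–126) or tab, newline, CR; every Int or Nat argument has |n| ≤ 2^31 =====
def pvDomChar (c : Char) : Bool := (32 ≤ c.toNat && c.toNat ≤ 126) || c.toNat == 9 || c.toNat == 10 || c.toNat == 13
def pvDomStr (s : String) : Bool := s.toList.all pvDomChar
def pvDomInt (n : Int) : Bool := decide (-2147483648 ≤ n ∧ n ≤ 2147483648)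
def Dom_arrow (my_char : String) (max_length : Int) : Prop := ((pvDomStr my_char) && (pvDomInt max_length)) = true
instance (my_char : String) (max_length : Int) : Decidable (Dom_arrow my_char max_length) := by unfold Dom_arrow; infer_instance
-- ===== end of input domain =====

-- B replaces A's two directional loops by one pass with the closed-form width max_length - |max_length - i|; objective: alternative.

-- Python's 's * n' (string repetition; '' for n ≤ 0) — exact, shared primitive of both ports
def pyStrMul (s : String) (n : Int) : String := String.ofList (List.flatten (List.replicate n.toNat s.toList))

-- ===== PORT A =====
-- first loop of A, with its (vacuous-at-the-last-step) break transliterated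
def arrowLoop1 (my_char : String) (max_length : Int) : List Int → List String → List String
  | [], acc => acc
  | i :: rest, acc =>
      let acc' := acc ++ [pyStrMul my_char i]
      if i == max_length then acc' else arrowLoop1 my_char max_length rest acc'

def arrow (my_char : String) (max_length : Int) : String :=
  let result := arrowLoop1 my_char max_length (PySem.List.pyRange 1 (max_length + 1) 1) []
  let result := (PySem.List.pyRange (max_length - 1) 0 (-1)).foldl
      (fun acc i => acc ++ [pyStrMul my_char i]) result
  PySem.Str.join "\n" result

-- ===== PORT B =====
def arrow_alt (my_char : String) (max_length : Int) : String :=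
  PySem.Str.join "\n"
    ((PySem.List.pyRange 1 (2 * max_length) 1).map
      (fun i => pyStrMul my_char (max_length - |max_length - i|)))

-- ===== PRECONDITION & SPEC =====
def Spec_arrow (my_char : String) (max_length : Int) (out : String) : Prop := out = arrow_alt my_char max_length
instance (my_char : String) (max_length : Int) (out : String) : Decidable (Spec_arrow my_char max_length out) := by unfold Spec_arrow; infer_instance

-- ===== CLAIM (what is proved, stated in full; the proofs are below) =====
def Claim_equal_arrow : Prop := ∀ (my_char : String) (max_length : Int), Dom_arrow my_char max_length → Spec_arrow my_char max_length (arrow my_char max_length)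

-- ===== LEMMAS AND PROOFS =====

-- the break fires exactly at the trailing element m and is then a no-op
theorem arrowLoop1_last (c : String) (m : Int) (L : List Int) (acc : List String)
    (h : ∀ i ∈ L, i ≠ m) :
    arrowLoop1 c m (L ++ [m]) acc = acc ++ (L ++ [m]).map (fun i => pyStrMul c i) := by
  induction L generalizing acc with
  | nil => simp [arrowLoop1]
  | cons i rest ih =>
      have hi : i ≠ m := h i (by simp)
      simp only [List.cons_append, arrowLoop1, beq_iff_eq, if_neg hi]
      rw [ih _ (fun j hj => h j (by simp [hj]))]
      simp

-- on the ascending half, B's closed-form width is just i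
theorem map_closed_asc (c : String) (m : Int) :
    (PySem.List.pyRange 1 (m + 1) 1).map (fun i => pyStrMul c (m - |m - i|)) =
    (PySem.List.pyRange 1 (m + 1) 1).map (fun i => pyStrMul c i) := by
  apply List.map_congr_left
  intro i hi
  have := PySem.List.mem_pyRange_one.mp hi
  have : |m - i| = m - i := abs_of_nonneg (by omega)
  rw [this]; ring_nf

-- on the upper half, B's closed form yields exactly A's descending loop
theorem map_closed_desc (c : String) (m : Int) :
    (PySem.List.pyRange (m + 1) (2 * m) 1).map (fun i => pyStrMul c (m - |m - i|)) =
    (PySem.List.pyRange (m - 1) 0 (-1)).map (fun i => pyStrMul c i) := by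
  rw [PySem.List.pyRange_one, PySem.List.pyRange_neg_one]
  have hlen : (2 * m - (m + 1)).toNat = (m - 1 - 0).toNat := by omega
  rw [hlen]
  simp only [List.map_map]
  apply List.map_congr_left
  intro k _
  simp only [Function.comp]
  have habs : |m - (m + 1 + (k : Int))| = 1 + k := by
    rw [abs_of_nonpos (by omega)]; ring
  rw [habs]; ring_nf

-- ===== VERDICT (by name: the statement is the Claim_ definition above) =====
theorem arrow_spec : Claim_equal_arrow := by
  intro c m _
  unfold Spec_arrow arrow arrow_alt
  by_cases hm : m ≤ 0
  · rw [PySem.List.pyRange_one_eq_nil (by omega), PySem.List.pyRange_neg_one_eq_nil (by omega),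
      PySem.List.pyRange_one_eq_nil (by omega)]
    simp [arrowLoop1]
  · have hsplit : PySem.List.pyRange 1 (m + 1) 1 = PySem.List.pyRange 1 m 1 ++ [m] :=
      PySem.List.pyRange_one_succ_right (by omega)
    have hno : ∀ i ∈ PySem.List.pyRange 1 m 1, i ≠ m := by
      intro i hi
      have := PySem.List.mem_pyRange_one.mp hi
      omega
    have hB : PySem.List.pyRange 1 (2 * m) 1 =
        PySem.List.pyRange 1 (m + 1) 1 ++ PySem.List.pyRange (m + 1) (2 * m) 1 :=
      PySem.List.pyRange_one_append 1 (m + 1) (2 * m) (by omega) (by omega)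
    rw [hB, List.map_append, map_closed_asc, map_closed_desc]
    conv_lhs => rw [hsplit]
    rw [arrowLoop1_last c m _ _ hno]
    simp only [PySem.List.foldl_append_singleton_eq_map, List.nil_append, ← hsplit]
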